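-- pv_equiv track=rewrite | github.com/rjadmscpfl/Network | CheckTraffic/CheckTraffic.py | parse_switchport_mode
-- ===== SOURCE A (Python) =====
-- from typing import Dict, List, Optional, Tuple
--
-- def parse_switchport_mode(output: str) -> Tuple[str, str]:
--     admin_mode = ""
--     operational_mode = ""
--
--     for line in output.splitlines():
--         s = line.strip()
--         if s.startswith("Administrative Mode:"):
--             admin_mode = s.split(":", 1)[1].strip()
--         elif s.startswith("Operational Mode:"):
--             operational_mode = s.split(":", 1)[1].strip()
--
--     return admin_mode, operational_mode
-- ===== SOURCE B (Python) =====
-- def parse_switchport_mode(output):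
--     lines = output.splitlines()
--
--     def last_value(label):
--         # scan back-to-front; the first match from the end is the last match overall
--         for raw in reversed(lines):
--             s = raw.strip()
--             if s.startswith(label):
--                 return s[len(label):].strip()
--         return ""
--
--     return last_value("Administrative Mode:"), last_value("Operational Mode:")
-- ===== Notes on version B (the rewrite author's own statement) =====
-- stated objective: alternative
-- what changed: Replaces A's single forward pass with two per-label mutating accumulators by two independent back-to-front scans with early exit (the first match from the end is A's last write), and replaces the one-shot colon split by slicing off the label prefix.
import Mathlib
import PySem

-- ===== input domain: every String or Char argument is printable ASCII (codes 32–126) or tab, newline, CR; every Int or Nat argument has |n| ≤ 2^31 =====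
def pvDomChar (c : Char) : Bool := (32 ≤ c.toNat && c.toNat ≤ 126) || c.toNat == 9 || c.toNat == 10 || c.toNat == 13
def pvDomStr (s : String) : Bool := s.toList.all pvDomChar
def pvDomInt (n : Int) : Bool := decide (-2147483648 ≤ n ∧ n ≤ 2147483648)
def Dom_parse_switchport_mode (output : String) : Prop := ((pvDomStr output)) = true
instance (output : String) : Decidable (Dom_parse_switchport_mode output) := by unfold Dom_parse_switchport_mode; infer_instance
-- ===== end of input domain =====

-- B replaces A's single forward pass with mutating accumulators by two independent
-- back-to-front scans (early exit at the first match from the end = A's last write)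
-- and slices the label prefix off instead of splitting at the colon; objective: alternative.


-- ===== PORT A =====
-- one loop iteration of A; s.split(":", 1)[1] is ported with pyGetD: the branch
-- guard (startswith "…:") guarantees index 1 exists, so the default is never read
def pvAStep (st : String × String) (line : String) : String × String :=
  let s := PySem.Str.strip line
  if PySem.Str.startswith s "Administrative Mode:" then
    (PySem.Str.strip (PySem.List.pyGetD ((PySem.Str.splitMax? s ":" 1).getD []) 1 ""), st.2)
  else if PySem.Str.startswith s "Operational Mode:" then
    (st.1, PySem.Str.strip (PySem.List.pyGetD ((PySem.Str.splitMax? s ":" 1).getD []) 1 ""))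
  else st

def parse_switchport_mode (output : String) : String × String :=
  (PySem.Str.splitlines output).foldl pvAStep ("", "")

-- ===== PORT B =====
-- B's helper last_value: walk the reversed line list, return at the first match
-- (early exit), "" if none matches; s[len(label):] is Str.slice from len(label)
def pvLastValue (revLines : List String) (label : String) : String :=
  match revLines with
  | [] => ""
  | raw :: rest =>
    let s := PySem.Str.strip raw
    if PySem.Str.startswith s label then
      PySem.Str.strip (PySem.Str.slice s (some (PySem.Str.len label)) none)
    else pvLastValue rest label

def parse_switchport_mode_alt (output : String) : String × String :=
  let lines := PySem.Str.splitlines output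
  (pvLastValue lines.reverse "Administrative Mode:",
   pvLastValue lines.reverse "Operational Mode:")

-- ===== PRECONDITION & SPEC =====
def Spec_parse_switchport_mode (output : String) (out : String × String) : Prop := out = parse_switchport_mode_alt output
instance (output : String) (out : String × String) : Decidable (Spec_parse_switchport_mode output out) := by unfold Spec_parse_switchport_mode; infer_instance

-- ===== CLAIM (what is proved, stated in full; the proofs are below) =====
def Claim_equal_parse_switchport_mode : Prop := ∀ (output : String), Dom_parse_switchport_mode output → Spec_parse_switchport_mode output (parse_switchport_mode output)

-- ===== LEMMAS AND PROOFS =====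

-- pvLastValue with an explicit default, for the induction
def pvLastD (revLines : List String) (label : String) (d : String) : String :=
  match revLines with
  | [] => d
  | raw :: rest =>
    let s := PySem.Str.strip raw
    if PySem.Str.startswith s label then
      PySem.Str.strip (PySem.Str.slice s (some (PySem.Str.len label)) none)
    else pvLastD rest label d

theorem pv_lastValue_eq (xs : List String) (label : String) :
    pvLastValue xs label = pvLastD xs label "" := by
  induction xs with
  | nil => rfl
  | cons x xs ih => simp only [pvLastValue, pvLastD, ih]

theorem pv_lastD_append (xs : List String) (l label d : String) :
    pvLastD (xs ++ [l]) label d =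
      pvLastD xs label
        (if PySem.Str.startswith (PySem.Str.strip l) label then
           PySem.Str.strip (PySem.Str.slice (PySem.Str.strip l) (some (PySem.Str.len label)) none)
         else d) := by
  induction xs with
  | nil => rfl
  | cons x xs ih => simp only [List.cons_append, pvLastD, ih]

-- splitOnMax.go with maxsplit 0 never splits
theorem pv_go_zero (fuel : Nat) (l cur : List Char) (acc : List (List Char)) :
    PySem.Chars.splitOnMax.go [':'] fuel 0 l cur acc = ((cur.reverse ++ l) :: acc).reverse := by
  cases fuel <;> cases l <;> simp [PySem.Chars.splitOnMax.go]

-- splitOnMax.go with maxsplit 1: split at the first colon, if any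
theorem pv_go_one (l : List Char) (fuel : Nat) (cur : List Char) (acc : List (List Char))
    (h : l.length ≤ fuel) :
    PySem.Chars.splitOnMax.go [':'] fuel 1 l cur acc =
      if ':' ∈ l then
        acc.reverse ++ [cur.reverse ++ l.takeWhile (· ≠ ':'), (l.dropWhile (· ≠ ':')).tail]
      else acc.reverse ++ [cur.reverse ++ l] := by
  induction l generalizing fuel cur acc with
  | nil => cases fuel <;> simp [PySem.Chars.splitOnMax.go]
  | cons c rest ih =>
    cases fuel with
    | zero => simp at h
    | succ f =>
      by_cases hc : c = ':'
      · subst hc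
        simp only [PySem.Chars.splitOnMax.go, List.isPrefixOf, if_neg (by omega : ¬(1:Nat) = 0)]
        simp [pv_go_zero, List.takeWhile, List.dropWhile]
      · simp only [PySem.Chars.splitOnMax.go, if_neg (by omega : ¬(1:Nat) = 0)]
        have hpre : [':'].isPrefixOf (c :: rest) = false := by
          simp [List.isPrefixOf]; intro h'; exact absurd h'.symm hc
        rw [hpre]
        simp only [Bool.false_eq_true, if_false]
        rw [ih f (c :: cur) acc (by simpa using h)]
        have ht : (c :: rest).takeWhile (· ≠ ':') = c :: rest.takeWhile (· ≠ ':') :=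
          List.takeWhile_cons_of_pos (by simp [hc])
        have hd : (c :: rest).dropWhile (· ≠ ':') = rest.dropWhile (· ≠ ':') :=
          List.dropWhile_cons_of_pos (by simp [hc])
        rw [ht, hd]
        by_cases hm : ':' ∈ rest <;> simp [hm, Ne.symm hc]

-- s.split(':', 1) on character lists
theorem pv_split1 (cs : List Char) :
    PySem.Chars.splitOnMax cs [':'] 1 =
      if ':' ∈ cs then [cs.takeWhile (· ≠ ':'), (cs.dropWhile (· ≠ ':')).tail]
      else [cs] := by
  unfold PySem.Chars.splitOnMax
  rw [if_neg (by omega), show (1 : Int).toNat = 1 from rfl]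
  rw [pv_go_one cs (cs.length + 1) [] [] (by omega)]
  split <;> simp

-- the two parts of s.split(':', 1) when s contains a colon
theorem pv_parts (s : String) (h : ':' ∈ s.toList) :
    (PySem.Str.splitMax? s ":" 1).getD [] =
      [String.ofList (s.toList.takeWhile (· ≠ ':')),
       String.ofList ((s.toList.dropWhile (· ≠ ':')).tail)] := by
  simp [PySem.Str.splitMax?, PySem.Chars.splitMax?, pv_split1, h]

-- takeWhile/dropWhile through a colon-free prefix followed by a colon
theorem pv_tw (p t : List Char) (hp : ':' ∉ p) :
    (p ++ ':' :: t).takeWhile (· ≠ ':') = p ∧ (p ++ ':' :: t).dropWhile (· ≠ ':') = ':' :: t := by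
  induction p with
  | nil => simp
  | cons c ps ih =>
    have hc : c ≠ ':' := fun h => hp (by simp [h])
    have hps : ':' ∉ ps := fun h => hp (by simp [h])
    obtain ⟨h1, h2⟩ := ih hps
    constructor
    · rw [List.cons_append, List.takeWhile_cons_of_pos (by simp [hc])]
      exact congrArg (c :: ·) h1
    · rw [List.cons_append, List.dropWhile_cons_of_pos (by simp [hc])]
      exact h2

-- when s starts with (p ++ ":"), A's split value and B's slice value coincide
theorem pv_val_eq (s : String) (p : List Char) (hp : ':' ∉ p)
    (h : PySem.Str.startswith s (String.ofList (p ++ [':'])) = true) :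
    PySem.Str.strip (PySem.List.pyGetD ((PySem.Str.splitMax? s ":" 1).getD []) 1 "") =
      PySem.Str.strip (PySem.Str.slice s (some (PySem.Str.len (String.ofList (p ++ [':'])))) none) := by
  rw [PySem.Str.startswith_eq, PySem.Chars.startswith, String.toList_ofList,
      List.isPrefixOf_iff_prefix] at h
  obtain ⟨t, ht⟩ := h
  rw [List.append_assoc] at ht
  have ht' : s.toList = p ++ ':' :: t := by rw [← ht]; rfl
  have hmem : ':' ∈ s.toList := by rw [ht']; simp
  obtain ⟨h1, h2⟩ := pv_tw p t hp
  have hlen : PySem.Str.len (String.ofList (p ++ [':'])) = ((p.length + 1 : Nat) : Int) := by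
    simp [PySem.Str.len_eq]
  have hA : PySem.List.pyGetD ((PySem.Str.splitMax? s ":" 1).getD []) 1 "" =
      String.ofList t := by
    rw [pv_parts s hmem]
    show String.ofList ((s.toList.dropWhile (· ≠ ':')).tail) = String.ofList t
    rw [ht', h2]
    rfl
  have hB : PySem.Str.slice s (some (PySem.Str.len (String.ofList (p ++ [':'])))) none =
      String.ofList t := by
    have hl : (PySem.Str.slice s (some (PySem.Str.len (String.ofList (p ++ [':'])))) none).toList
        = t := by
      rw [hlen, PySem.Str.toList_slice, PySem.Chars.slice_eq_listSlice,
          PySem.List.slice_from_natCast, ht']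
      simp
    rw [← hl, String.ofList_toList]
  rw [hA, hB]

-- a string cannot start with both labels (their first characters differ)
theorem pv_not_both (s : String)
    (hA : PySem.Str.startswith s "Administrative Mode:" = true)
    (hO : PySem.Str.startswith s "Operational Mode:" = true) : False := by
  rw [PySem.Str.startswith_eq, PySem.Chars.startswith, List.isPrefixOf_iff_prefix] at hA hO
  obtain ⟨t1, h1⟩ := hA
  obtain ⟨t2, h2⟩ := hO
  rw [← h1] at h2
  rw [show "Administrative Mode:".toList = 'A' :: "dministrative Mode:".toList from rfl,
      show "Operational Mode:".toList = 'O' :: "perational Mode:".toList from rfl] at h2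
  simp at h2

-- pvAStep written componentwise (legal because no line matches both labels)
theorem pvAStep_eq (st : String × String) (l : String) :
    pvAStep st l =
      (if PySem.Str.startswith (PySem.Str.strip l) "Administrative Mode:" then
         PySem.Str.strip (PySem.List.pyGetD
           ((PySem.Str.splitMax? (PySem.Str.strip l) ":" 1).getD []) 1 "")
       else st.1,
       if PySem.Str.startswith (PySem.Str.strip l) "Operational Mode:" then
         PySem.Str.strip (PySem.List.pyGetD
           ((PySem.Str.splitMax? (PySem.Str.strip l) ":" 1).getD []) 1 "")
       else st.2) := by
  show (if PySem.Str.startswith (PySem.Str.strip l) "Administrative Mode:" = true then _ else _) = _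
  by_cases hA : PySem.Str.startswith (PySem.Str.strip l) "Administrative Mode:" = true
  · by_cases hO : PySem.Str.startswith (PySem.Str.strip l) "Operational Mode:" = true
    · exact (pv_not_both _ hA hO).elim
    · rw [if_pos hA, if_pos hA, if_neg hO]
  · by_cases hO : PySem.Str.startswith (PySem.Str.strip l) "Operational Mode:" = true
    · rw [if_neg hA, if_pos hO, if_neg hA, if_pos hO]
    · rw [if_neg hA, if_neg hO, if_neg hA, if_neg hO]

-- the main bridge: A's fold equals the pair of defaulted back-to-front scans
theorem pv_main (lines : List String) (a o : String) :
    lines.foldl pvAStep (a, o) =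
      (pvLastD lines.reverse "Administrative Mode:" a,
       pvLastD lines.reverse "Operational Mode:" o) := by
  induction lines generalizing a o with
  | nil => rfl
  | cons l rest ih =>
    rw [List.foldl_cons, pvAStep_eq, ih, List.reverse_cons, pv_lastD_append, pv_lastD_append]
    have e1 : (if PySem.Str.startswith (PySem.Str.strip l) "Administrative Mode:" = true then
          PySem.Str.strip (PySem.List.pyGetD
            ((PySem.Str.splitMax? (PySem.Str.strip l) ":" 1).getD []) 1 "")
        else a) =
        (if PySem.Str.startswith (PySem.Str.strip l) "Administrative Mode:" then
          PySem.Str.strip (PySem.Str.slice (PySem.Str.strip l)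
            (some (PySem.Str.len "Administrative Mode:")) none)
        else a) := by
      by_cases hA : PySem.Str.startswith (PySem.Str.strip l) "Administrative Mode:" = true
      · rw [if_pos hA, if_pos hA]
        exact pv_val_eq _ "Administrative Mode".toList (by decide)
          (by rw [show String.ofList ("Administrative Mode".toList ++ [':']) =
                "Administrative Mode:" from rfl]; exact hA)
      · rw [if_neg hA, if_neg hA]
    have e2 : (if PySem.Str.startswith (PySem.Str.strip l) "Operational Mode:" = true then
          PySem.Str.strip (PySem.List.pyGetD
            ((PySem.Str.splitMax? (PySem.Str.strip l) ":" 1).getD []) 1 "")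
        else o) =
        (if PySem.Str.startswith (PySem.Str.strip l) "Operational Mode:" then
          PySem.Str.strip (PySem.Str.slice (PySem.Str.strip l)
            (some (PySem.Str.len "Operational Mode:")) none)
        else o) := by
      by_cases hO : PySem.Str.startswith (PySem.Str.strip l) "Operational Mode:" = true
      · rw [if_pos hO, if_pos hO]
        exact pv_val_eq _ "Operational Mode".toList (by decide)
          (by rw [show String.ofList ("Operational Mode".toList ++ [':']) =
                "Operational Mode:" from rfl]; exact hO)
      · rw [if_neg hO, if_neg hO]
    rw [e1, e2]

-- ===== VERDICT (by name: the statement is the Claim_ definition above) =====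
theorem parse_switchport_mode_spec : Claim_equal_parse_switchport_mode := by
  intro output _
  show parse_switchport_mode output = parse_switchport_mode_alt output
  unfold parse_switchport_mode parse_switchport_mode_alt
  simp only [pv_lastValue_eq]
  exact pv_main _ "" ""
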